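-- pv_equiv track=rewrite | github.com/RodrigoEC/P1-questions | unidade07/afinidade_musical/afinidade_musical.py | tem_afinidade
-- ===== SOURCE A (Python) =====
-- def tem_afinidade(playlist1, playlist2):
--     contador = 0
--     for artista in playlist1:
--         for artist in playlist2:
--             if artista == artist:
--                 contador += 1
--
--     if contador >= 3:
--         return True
--
--     else:
--         return False
-- ===== SOURCE B (Python) =====
-- def tem_afinidade(playlist1, playlist2):
--     a = sorted(playlist1)
--     b = sorted(playlist2)
--     total = 0
--     i = 0
--     j = 0
--     while i < len(a) and j < len(b):
--         if a[i] < b[j]: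
--             i += 1
--         elif b[j] < a[i]:
--             j += 1
--         else:
--             x = a[i]
--             ci = 0
--             while i < len(a) and a[i] == x:
--                 ci += 1
--                 i += 1
--             cj = 0
--             while j < len(b) and b[j] == x:
--                 cj += 1
--                 j += 1
--             total += ci * cj
--     return total >= 3
-- ===== Notes on version B (the rewrite author's own statement) =====
-- stated objective: faster
-- what changed: Replaces A's nested O(n*m) pairwise comparison with sort-both-playlists and a two-pointer merge over runs of equal artists, adding the product of run lengths for each shared artist.
import Mathlib
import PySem

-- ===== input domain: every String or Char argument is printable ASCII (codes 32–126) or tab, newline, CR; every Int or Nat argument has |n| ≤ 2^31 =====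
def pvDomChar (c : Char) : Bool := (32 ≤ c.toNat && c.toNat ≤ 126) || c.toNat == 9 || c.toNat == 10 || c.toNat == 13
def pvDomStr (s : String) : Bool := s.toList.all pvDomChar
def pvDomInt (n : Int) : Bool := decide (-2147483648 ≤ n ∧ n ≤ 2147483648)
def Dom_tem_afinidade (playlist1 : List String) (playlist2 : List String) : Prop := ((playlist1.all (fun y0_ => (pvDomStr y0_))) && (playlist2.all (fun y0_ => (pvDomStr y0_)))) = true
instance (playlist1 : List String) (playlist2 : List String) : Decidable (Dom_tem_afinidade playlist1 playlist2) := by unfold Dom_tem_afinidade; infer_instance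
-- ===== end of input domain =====

-- B sorts both playlists and counts matches by a two-pointer merge over runs of
-- equal artists (product of run lengths per shared artist); O((n+m)log) vs A's O(n*m).

-- ===== PORT A =====
def tem_afinidade (playlist1 : List String) (playlist2 : List String) : Bool :=
  let contador : Int := playlist1.foldl (fun c artista =>
    playlist2.foldl (fun c' artist => if artista == artist then c' + 1 else c') c) 0
  if contador ≥ 3 then true else false

-- ===== PORT B =====
-- inner while loops of Source B: consume the leading run of elements equal to x,
-- returning the run length and the remaining suffix
def pvRunLen (x : String) : List String → Nat × List String
  | [] => (0, [])
  | a :: t => if a == x then ((pvRunLen x t).1 + 1, (pvRunLen x t).2) else (0, a :: t)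

theorem pvRunLen_snd_le (x : String) (l : List String) : (pvRunLen x l).2.length ≤ l.length := by
  induction l with
  | nil => simp [pvRunLen]
  | cons a t ih =>
    by_cases h : (a == x) = true
    · simp [pvRunLen, h]; omega
    · simp [pvRunLen, h]

-- outer while loop of Source B: two-pointer merge over the two sorted lists
def pvMergeTotal : List String → List String → Int
  | [], _ => 0
  | _ :: _, [] => 0
  | x :: xs, y :: ys =>
    if x < y then pvMergeTotal xs (y :: ys)
    else if y < x then pvMergeTotal (x :: xs) ys
    else
      ((pvRunLen x (x :: xs)).1 : Int) * ((pvRunLen x (y :: ys)).1 : Int) +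
        pvMergeTotal (pvRunLen x (x :: xs)).2 (pvRunLen x (y :: ys)).2
termination_by a b => a.length + b.length
decreasing_by
  · simp
  · simp
  · have h1 : (pvRunLen x (x :: xs)).2.length ≤ xs.length := by
      simpa [pvRunLen] using pvRunLen_snd_le x xs
    have hxy : x = y := le_antisymm (le_of_not_gt (by assumption)) (le_of_not_gt (by assumption))
    have h2 : (pvRunLen x (y :: ys)).2.length ≤ ys.length := by
      subst hxy
      simpa [pvRunLen] using pvRunLen_snd_le x ys
    simp; omega

def tem_afinidade_alt (playlist1 : List String) (playlist2 : List String) : Bool :=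
  let a := PySem.List.sorted playlist1 (fun s => s) false
  let b := PySem.List.sorted playlist2 (fun s => s) false
  let total : Int := pvMergeTotal a b
  decide (total ≥ 3)

-- ===== PRECONDITION & SPEC =====
def Spec_tem_afinidade (playlist1 : List String) (playlist2 : List String) (out : Bool) : Prop := out = tem_afinidade_alt playlist1 playlist2
instance (playlist1 : List String) (playlist2 : List String) (out : Bool) : Decidable (Spec_tem_afinidade playlist1 playlist2 out) := by unfold Spec_tem_afinidade; infer_instance

-- ===== CLAIM (what is proved, stated in full; the proofs are below) =====
def Claim_equal_tem_afinidade : Prop := ∀ (playlist1 : List String) (playlist2 : List String), Dom_tem_afinidade playlist1 playlist2 → Spec_tem_afinidade playlist1 playlist2 (tem_afinidade playlist1 playlist2)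

-- ===== LEMMAS AND PROOFS =====

-- A's inner loop adds the number of occurrences of x in l to the running counter.
theorem inner_foldl_count (x : String) (l : List String) (c : Int) :
    l.foldl (fun c' a => if x == a then c' + 1 else c') c = c + (l.count x : Int) := by
  induction l generalizing c with
  | nil => simp
  | cons hd t ih =>
    by_cases hx : x = hd
    · subst hx
      simp only [List.foldl_cons, beq_self_eq_true, ite_true, ih, List.count_cons_self]
      push_cast; ring
    · have hb : (x == hd) = false := by simp [hx]
      simp only [List.foldl_cons, hb, Bool.false_eq_true, ite_false, ih]
      simp [Ne.symm hx]

-- pvRunLen is takeWhile-length / dropWhile.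
theorem pvRunLen_eq (x : String) (l : List String) :
    pvRunLen x l = ((l.takeWhile (· == x)).length, l.dropWhile (· == x)) := by
  induction l with
  | nil => simp [pvRunLen]
  | cons a t ih =>
    by_cases h : (a == x) = true
    · simp [pvRunLen, h, ih]
    · simp [pvRunLen, h]

-- In a sorted list whose elements are all ≥ x, everything after the leading
-- run of x's is strictly greater than x.
theorem sorted_dropWhile_gt (x : String) (l : List String)
    (hp : l.Pairwise (· ≤ ·)) (hge : ∀ z ∈ l, x ≤ z) :
    ∀ z ∈ l.dropWhile (· == x), x < z := by
  induction l with
  | nil => simp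
  | cons a t ih =>
    rcases List.pairwise_cons.mp hp with ⟨hat, hpt⟩
    by_cases h : (a == x) = true
    · simp only [List.dropWhile_cons, h, if_true]
      exact ih hpt (fun z hz => hge z (List.mem_cons_of_mem _ hz))
    · simp only [List.dropWhile_cons, h, if_false]
      intro z hz
      have hax : a ≠ x := fun heq => h (by rw [heq]; simp)
      have hxa : x < a := lt_of_le_of_ne (hge a List.mem_cons_self) (Ne.symm hax)
      rcases List.mem_cons.mp hz with rfl | hz'
      · exact hxa
      · exact lt_of_lt_of_le hxa (hat z hz')

-- Count of x in a sorted list headed by x is the leading-run length.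
theorem count_eq_run (x : String) (l : List String)
    (hp : l.Pairwise (· ≤ ·)) (hge : ∀ z ∈ l, x ≤ z) :
    l.count x = (l.takeWhile (· == x)).length := by
  have hsplit := List.takeWhile_append_dropWhile (l := l) (p := (· == x))
  have hdrop : (l.dropWhile (· == x)).count x = 0 := by
    rw [List.count_eq_zero]
    intro hmem
    exact absurd rfl (ne_of_gt (sorted_dropWhile_gt x l hp hge x hmem))
  have htake : (l.takeWhile (· == x)).count x = (l.takeWhile (· == x)).length := by
    rw [List.count_eq_length]
    intro z hz
    have hz' := List.mem_takeWhile_imp hz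
    exact (eq_of_beq hz').symm
  conv_lhs => rw [← hsplit]
  rw [List.count_append, hdrop, htake]
  omega

-- Merge of two sorted lists computes the total number of matching pairs.
theorem pvMergeTotal_eq (n : Nat) :
    ∀ (a b : List String), a.length + b.length ≤ n →
      a.Pairwise (· ≤ ·) → b.Pairwise (· ≤ ·) →
      pvMergeTotal a b = (a.map (fun z => (b.count z : Int))).sum := by
  induction n with
  | zero =>
    intro a b hlen _ _
    have ha : a = [] := List.eq_nil_of_length_eq_zero (by omega)
    subst ha; cases b <;> simp [pvMergeTotal]
  | succ n ih =>
    intro a b hlen hpa hpb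
    match a, b with
    | [], _ => simp [pvMergeTotal]
    | _ :: _, [] => simp [pvMergeTotal]
    | x :: xs, y :: ys =>
      rcases List.pairwise_cons.mp hpa with ⟨hxxs, hpxs⟩
      rcases List.pairwise_cons.mp hpb with ⟨hyys, hpys⟩
      simp only [List.length_cons] at hlen
      by_cases hlt : x < y
      · rw [pvMergeTotal]
        simp only [if_pos hlt]
        have hcount : (y :: ys).count x = 0 := by
          rw [List.count_eq_zero]
          intro hmem
          rcases List.mem_cons.mp hmem with rfl | hmem'
          · exact absurd hlt (lt_irrefl x)
          · exact absurd (lt_of_lt_of_le hlt (hyys x hmem')) (lt_irrefl x)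
        rw [ih xs (y :: ys) (by simp only [List.length_cons]; omega) hpxs hpb]
        simp [hcount]
      · by_cases hgt : y < x
        · rw [pvMergeTotal]
          simp only [if_neg hlt, if_pos hgt]
          have hmap : (x :: xs).map (fun z => (((y :: ys).count z : Nat) : Int))
              = (x :: xs).map (fun z => ((ys.count z : Nat) : Int)) := by
            apply List.map_congr_left
            intro z hz
            have hyz : y < z := by
              rcases List.mem_cons.mp hz with rfl | hz'
              · exact hgt
              · exact lt_of_lt_of_le hgt (hxxs z hz')
            have hne : y ≠ z := ne_of_lt hyz
            simp [List.count_cons, hne]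
          rw [ih (x :: xs) ys (by simp only [List.length_cons]; omega) hpa hpys, hmap]
        · have hxy : x = y := le_antisymm (le_of_not_gt hgt) (le_of_not_gt hlt)
          subst hxy
          rw [pvMergeTotal]
          simp only [if_neg hlt, if_neg hgt]
          rw [pvRunLen_eq, pvRunLen_eq]
          set A := x :: xs with hA
          set B := x :: ys with hB
          have hgeA : ∀ z ∈ A, x ≤ z := by
            intro z hz; rcases List.mem_cons.mp hz with rfl | hz' <;> [exact le_refl z; exact hxxs z hz']
          have hgeB : ∀ z ∈ B, x ≤ z := by
            intro z hz; rcases List.mem_cons.mp hz with rfl | hz' <;> [exact le_refl z; exact hyys z hz']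
          have hcntB : B.count x = (B.takeWhile (· == x)).length := count_eq_run x B hpb hgeB
          have hpA' : (A.dropWhile (· == x)).Pairwise (· ≤ ·) :=
            hpa.sublist (List.dropWhile_sublist _)
          have hpB' : (B.dropWhile (· == x)).Pairwise (· ≤ ·) :=
            hpb.sublist (List.dropWhile_sublist _)
          have hlenA : (A.dropWhile (· == x)).length ≤ xs.length := by
            have := pvRunLen_snd_le x A
            rw [pvRunLen_eq] at this
            simp only [hA] at this ⊢
            rw [List.dropWhile_cons, if_pos (by simp)] at this ⊢
            exact pvRunLen_snd_le x xs |>.trans_eq' (by rw [pvRunLen_eq])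
          have hlenB : (B.dropWhile (· == x)).length ≤ ys.length := by
            simp only [hB]
            rw [List.dropWhile_cons, if_pos (by simp)]
            exact pvRunLen_snd_le x ys |>.trans_eq' (by rw [pvRunLen_eq])
          have hIH := ih (A.dropWhile (· == x)) (B.dropWhile (· == x)) (by omega) hpA' hpB'
          rw [hIH]
          -- split the sum over A into the leading run part and the rest
          have hsplitA := List.takeWhile_append_dropWhile (l := A) (p := (· == x))
          have hsum : (A.map (fun z => ((B.count z : Nat) : Int))).sum
              = ((A.takeWhile (· == x)).map (fun z => ((B.count z : Nat) : Int))).sum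
                + ((A.dropWhile (· == x)).map (fun z => ((B.count z : Nat) : Int))).sum := by
            conv_lhs => rw [← hsplitA]
            rw [List.map_append, List.sum_append]
          rw [hsum]
          -- leading run: every element is x, each contributes B.count x
          have htakeA : (A.takeWhile (· == x)).map (fun z => ((B.count z : Nat) : Int))
              = (A.takeWhile (· == x)).map (fun _ => ((B.count x : Nat) : Int)) := by
            apply List.map_congr_left
            intro z hz
            have := List.mem_takeWhile_imp hz
            have hz' : z = x := eq_of_beq this
            rw [hz']
          have hrun : ((A.takeWhile (· == x)).map (fun z => ((B.count z : Nat) : Int))).sum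
              = ((A.takeWhile (· == x)).length : Int) * ((B.takeWhile (· == x)).length : Int) := by
            rw [htakeA, List.map_const', List.sum_replicate, nsmul_eq_mul, hcntB]
          rw [hrun]
          -- rest: elements > x, so count in B equals count in B's drop part
          have hrest : (A.dropWhile (· == x)).map (fun z => ((B.count z : Nat) : Int))
              = (A.dropWhile (· == x)).map (fun z => (((B.dropWhile (· == x)).count z : Nat) : Int)) := by
            apply List.map_congr_left
            intro z hz
            have hzgt : x < z := sorted_dropWhile_gt x A hpa hgeA z hz
            have hcnt : B.count z = (B.dropWhile (· == x)).count z := by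
              conv_lhs => rw [← List.takeWhile_append_dropWhile (l := B) (p := (· == x))]
              rw [List.count_append]
              have : (B.takeWhile (· == x)).count z = 0 := by
                rw [List.count_eq_zero]
                intro hmem
                have h1 := List.mem_takeWhile_imp hmem
                exact absurd (eq_of_beq h1) (ne_of_gt hzgt)
              omega
            rw [hcnt]
          rw [hrest]

-- ===== VERDICT (by name: the statement is the Claim_ definition above) =====
theorem tem_afinidade_spec : Claim_equal_tem_afinidade := by
  intro p1 p2 hdom
  clear hdom
  unfold Spec_tem_afinidade tem_afinidade tem_afinidade_alt
  have houter : ∀ (c : Int), p1.foldl (fun c artista =>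
      p2.foldl (fun c' artist => if artista == artist then c' + 1 else c') c) c
      = c + (p1.map (fun z => ((p2.count z : Nat) : Int))).sum := by
    induction p1 with
    | nil => intro c; simp
    | cons hd t ih =>
      intro c
      simp only [List.foldl_cons, List.map_cons, List.sum_cons]
      rw [inner_foldl_count, ih]
      ring
  have hs1 := PySem.List.sorted_perm p1 (fun s => s) false
  have hs2 := PySem.List.sorted_perm p2 (fun s => s) false
  have hp1 : (PySem.List.sorted p1 (fun s => s) false).Pairwise (· ≤ ·) := by
    simpa using PySem.List.sorted_pairwise p1 (fun s => s)
  have hp2 : (PySem.List.sorted p2 (fun s => s) false).Pairwise (· ≤ ·) := by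
    simpa using PySem.List.sorted_pairwise p2 (fun s => s)
  have hB := pvMergeTotal_eq ((PySem.List.sorted p1 (fun s => s) false).length
      + (PySem.List.sorted p2 (fun s => s) false).length)
      (PySem.List.sorted p1 (fun s => s) false) (PySem.List.sorted p2 (fun s => s) false)
      (le_refl _) hp1 hp2
  have hcnt : ∀ z, (PySem.List.sorted p2 (fun s => s) false).count z = p2.count z :=
    fun z => hs2.count_eq z
  have hmap : (PySem.List.sorted p1 (fun s => s) false).map
        (fun z => (((PySem.List.sorted p2 (fun s => s) false).count z : Nat) : Int))
      = (PySem.List.sorted p1 (fun s => s) false).map (fun z => ((p2.count z : Nat) : Int)) := by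
    apply List.map_congr_left
    intro z _
    rw [hcnt]
  have hperm : ((PySem.List.sorted p1 (fun s => s) false).map
      (fun z => ((p2.count z : Nat) : Int))).Perm (p1.map (fun z => ((p2.count z : Nat) : Int))) :=
    hs1.map _
  have hEq : pvMergeTotal (PySem.List.sorted p1 (fun s => s) false)
        (PySem.List.sorted p2 (fun s => s) false)
      = (p1.map (fun z => ((p2.count z : Nat) : Int))).sum := by
    rw [hB, hmap, hperm.sum_eq]
  simp only [houter 0, zero_add, hEq]
  by_cases h3 : (p1.map (fun z => ((p2.count z : Nat) : Int))).sum ≥ 3 <;> simp [h3]
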